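-- pv_equiv track=rewrite | github.com/mtang398/NLP-dictionary-Project | WSJ_POS_CORPUS_FOR_STUDENTS/MT4379trainHMM_HW3.py | split_test_set
-- ===== SOURCE A (Python) =====
-- def split_test_set(test_set):
--     sentence = []
--     sentences = []
--     for line in test_set:
--         split = line.split()
--         if not split:
--             sentences.append(sentence)
--             sentence = []
--         else:
--             sentence.append(split[0])
--     return sentences
-- ===== SOURCE B (Python) =====
-- def split_test_set(test_set):
--     def first_blank(lines):
--         for i, l in enumerate(lines):
--             if not l.split():
--                 return i
--         return None
--     i = first_blank(test_set)
--     if i is None: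
--         return []
--     return [[l.split()[0] for l in test_set[:i]]] + split_test_set(test_set[i+1:])
-- ===== Notes on version B (the rewrite author's own statement) =====
-- stated objective: alternative
-- what changed: Replaces A's single accumulator loop (flush current sentence on each blank line) by a recursive find-first-blank decomposition: locate the first blank line, map the first tokens of the prefix, and recurse on the suffix after the blank.
import Mathlib
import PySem

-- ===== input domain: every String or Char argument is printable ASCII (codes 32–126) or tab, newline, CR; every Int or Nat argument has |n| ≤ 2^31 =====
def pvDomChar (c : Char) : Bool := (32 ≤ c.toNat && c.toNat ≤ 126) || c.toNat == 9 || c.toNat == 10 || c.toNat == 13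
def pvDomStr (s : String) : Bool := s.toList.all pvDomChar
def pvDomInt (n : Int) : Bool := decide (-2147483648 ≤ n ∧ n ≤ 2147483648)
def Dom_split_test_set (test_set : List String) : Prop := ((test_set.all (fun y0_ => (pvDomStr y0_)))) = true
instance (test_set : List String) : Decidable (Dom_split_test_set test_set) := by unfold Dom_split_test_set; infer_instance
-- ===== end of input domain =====

-- B replaces A's accumulator loop by a recursive find-first-blank / take-prefix / recurse-on-suffix decomposition; same cost, proved to return the same value.

-- ===== PORT A =====
-- A: fold over the lines with state (sentence, sentences); blank line flushes sentence, otherwise append the first token.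
def split_test_set (test_set : List String) : List (List String) :=
  (test_set.foldl
    (fun (st : List String × List (List String)) line =>
      let split := PySem.Str.split₀ line
      if split.isEmpty then ([], st.2 ++ [st.1])
      else (st.1 ++ [split.headD ""], st.2))   -- split[0]: split is nonempty in this branch, so headD never defaults
    ([], [])).2

-- ===== PORT B =====
-- first_blank: index of the first line whose .split() is empty
def pvFirstBlank : List String → Option Nat
  | [] => none
  | x :: r => if (PySem.Str.split₀ x).isEmpty then some 0 else (pvFirstBlank r).map (· + 1)

theorem pvFirstBlank_lt (xs : List String) (i : Nat) (h : pvFirstBlank xs = some i) : i < xs.length := by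
  induction xs generalizing i with
  | nil => simp [pvFirstBlank] at h
  | cons x r ih =>
    simp only [pvFirstBlank] at h
    split at h
    · simp only [Option.some.injEq] at h; simp; omega
    · cases hr : pvFirstBlank r with
      | none => simp [hr] at h
      | some j => simp [hr] at h; have := ih j hr; simp [List.length]; omega
    
-- l.split()[0]: every line before the first blank has a nonempty split, so headD never defaults
def pvTok (l : String) : String := (PySem.Str.split₀ l).headD ""

def split_test_set_alt (test_set : List String) : List (List String) :=
  match h : pvFirstBlank test_set with
  | none => []
  | some i => ((test_set.take i).map pvTok) :: split_test_set_alt (test_set.drop (i + 1))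
  termination_by test_set.length
  decreasing_by
    have := pvFirstBlank_lt test_set i h
    simp [List.length_drop]; omega

-- ===== PRECONDITION & SPEC =====
def Spec_split_test_set (test_set : List String) (out : List (List String)) : Prop := out = split_test_set_alt test_set
instance (test_set : List String) (out : List (List String)) : Decidable (Spec_split_test_set test_set out) := by unfold Spec_split_test_set; infer_instance

-- ===== CLAIM (what is proved, stated in full; the proofs are below) =====
def Claim_equal_split_test_set : Prop := ∀ (test_set : List String), Dom_split_test_set test_set → Spec_split_test_set test_set (split_test_set test_set)

-- ===== LEMMAS AND PROOFS =====

-- the tail of A's loop, with the pending sentence as a parameter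
def pvG (sent : List String) : List String → List (List String)
  | [] => []
  | x :: r =>
    if (PySem.Str.split₀ x).isEmpty then sent :: pvG [] r
    else pvG (sent ++ [(PySem.Str.split₀ x).headD ""]) r

theorem pvA_loop (xs : List String) (sent : List String) (sents : List (List String)) :
    (xs.foldl
      (fun (st : List String × List (List String)) line =>
        let split := PySem.Str.split₀ line
        if split.isEmpty then ([], st.2 ++ [st.1])
        else (st.1 ++ [split.headD ""], st.2))
      (sent, sents)).2 = sents ++ pvG sent xs := by
  induction xs generalizing sent sents with
  | nil => simp [pvG]
  | cons x r ih =>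
    simp only [List.foldl, pvG]
    split
    · rw [ih]; simp
    · rw [ih]

theorem pvG_eq (xs : List String) (sent : List String) :
    pvG sent xs =
      match pvFirstBlank xs with
      | none => []
      | some i => (sent ++ (xs.take i).map pvTok) :: split_test_set_alt (xs.drop (i + 1)) := by
  induction xs generalizing sent with
  | nil => simp [pvG, pvFirstBlank]
  | cons x r ih =>
    simp only [pvG, pvFirstBlank]
    split
    · rw [ih]
      simp only [List.take_zero, List.map_nil, List.append_nil, List.nil_append,
        List.drop_succ_cons, List.drop_zero]
      conv_rhs => rw [split_test_set_alt.eq_def]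
      cases hr : pvFirstBlank r <;> simp
    · rw [ih]
      cases hr : pvFirstBlank r with
      | none => simp
      | some j => simp [pvTok, List.take_succ_cons]

-- ===== VERDICT (by name: the statement is the Claim_ definition above) =====
theorem split_test_set_spec : Claim_equal_split_test_set := by
  intro ts _
  show split_test_set ts = split_test_set_alt ts
  rw [split_test_set, pvA_loop, pvG_eq]
  rw [split_test_set_alt.eq_def]
  cases h : pvFirstBlank ts <;> simp
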